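-- pv_equiv track=rewrite | github.com/manoj-cl/AWS_sg_manager | SG_manager_v2_dynamic_input.py | merge_by_cidr
-- ===== SOURCE A (Python) =====
-- from collections import defaultdict
--
-- def merge_port_ranges(ranges):
--     """
--     Merge overlapping or adjacent port ranges.
--     Input: [(1000,1003), (1004,1005), (2000,2005)]
--     Output: [(1000,1005), (2000,2005)]
--     """
--     if not ranges:
--         return []
--
--     ranges = sorted(ranges, key=lambda r: r[0])
--     merged = [ranges[0]]
--
--     for cur_start, cur_end in ranges[1:]:
--         last_start, last_end = merged[-1]
--
--         if cur_start <= last_end + 1:  # overlapping or adjacent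
--             merged[-1] = (last_start, max(last_end, cur_end))
--         else:
--             merged.append((cur_start, cur_end))
--
--     return merged
--
-- def merge_by_cidr(rules_to_add):
--     cidr_to_ports = defaultdict(list)
--
--     for cidr, (start, end) in rules_to_add:
--         cidr_to_ports[cidr].append((start, end))
--
--     merged_output = []
--
--     for cidr, port_ranges in cidr_to_ports.items():
--         merged_ranges = merge_port_ranges(port_ranges)
--         for r in merged_ranges:
--             merged_output.append((cidr, r))
--
--     return merged_output
-- ===== SOURCE B (Python) =====
-- def merge_by_cidr(rules_to_add):
--     # One global stable sort by range start, then a single sweep that keeps, per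
--     # cidr, the currently open merged range and the list of finished ranges.
--     cur = {}    # cidr -> currently open (start, end)
--     done = {}   # cidr -> finished merged ranges, in order
--     for cidr, (s, e) in sorted(rules_to_add, key=lambda p: p[1][0]):
--         open_range = cur.get(cidr)
--         if open_range is None:
--             cur[cidr] = (s, e)
--             done[cidr] = []
--         else:
--             cs, ce = open_range
--             if s <= ce + 1:
--                 cur[cidr] = (cs, max(ce, e))
--             else:
--                 done[cidr].append((cs, ce))
--                 cur[cidr] = (s, e)
--     out = []
--     for cidr in dict.fromkeys(c for c, _ in rules_to_add):
--         for r in done[cidr]: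
--             out.append((cidr, r))
--         out.append((cidr, cur[cidr]))
--     return out
-- ===== Notes on version B (the rewrite author's own statement) =====
-- stated objective: alternative
-- what changed: Instead of grouping ranges per cidr with a defaultdict and then sorting and merging each group with a merged[-1]-mutating loop, B stably sorts the whole rule list once by range start and does a single sweep that keeps, per cidr, the currently open merged range and its finished ranges, emitting the output in first-occurrence cidr order.
import Mathlib
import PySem

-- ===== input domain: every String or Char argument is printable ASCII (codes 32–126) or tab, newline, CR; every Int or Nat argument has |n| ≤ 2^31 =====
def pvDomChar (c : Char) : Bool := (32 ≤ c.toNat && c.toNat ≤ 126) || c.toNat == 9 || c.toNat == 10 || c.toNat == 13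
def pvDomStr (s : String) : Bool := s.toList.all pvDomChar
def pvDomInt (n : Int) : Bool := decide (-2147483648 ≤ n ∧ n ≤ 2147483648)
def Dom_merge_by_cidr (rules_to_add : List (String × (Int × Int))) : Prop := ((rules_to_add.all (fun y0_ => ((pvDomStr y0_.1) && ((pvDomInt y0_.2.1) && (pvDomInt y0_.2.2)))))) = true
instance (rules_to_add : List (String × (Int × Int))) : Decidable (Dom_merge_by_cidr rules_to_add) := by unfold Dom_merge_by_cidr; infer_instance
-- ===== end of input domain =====

-- B replaces A's per-cidr gather / per-group sort / merged[-1]-mutating merge with ONE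
-- global stable sort by range start followed by a single sweep keeping, per cidr, the
-- open merged range and the finished ranges (objective: alternative algorithm).

-- ===== PORT A =====
-- loop body of merge_port_ranges: merged[-1] is read with getLastD (merged is never
-- empty there) and 'merged[-1] = …' becomes dropLast ++ [...]
def pvAStep (merged : List (Int × Int)) (p : Int × Int) : List (Int × Int) :=
  let last := merged.getLastD (0, 0)
  if p.1 ≤ last.2 + 1 then merged.dropLast ++ [(last.1, max last.2 p.2)]
  else merged ++ [(p.1, p.2)]

def merge_port_ranges (ranges : List (Int × Int)) : List (Int × Int) :=
  -- 'if not ranges: return []' is the [] case (sorted of a nonempty list is nonempty);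
  -- r0 = ranges[0], rest = ranges[1:]
  match PySem.List.sorted ranges (fun r => r.1) false with
  | [] => []
  | r0 :: rest => rest.foldl pvAStep [r0]

def merge_by_cidr (rules_to_add : List (String × (Int × Int))) : List (String × (Int × Int)) :=
  let cidr_to_ports := rules_to_add.foldl
    (fun d p => d.modify p.1 [] (· ++ [p.2])) (PySem.Dict.empty : PySem.Dict String (List (Int × Int)))
  cidr_to_ports.items.foldl
    (fun out ci => (merge_port_ranges ci.2).foldl (fun out r => out ++ [(ci.1, r)]) out) []

-- ===== PORT B =====
-- sweep step: cur = st.1 (cidr -> open merged range), done = st.2 (cidr -> finished ranges)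
def pvBStep (st : PySem.Dict String (Int × Int) × PySem.Dict String (List (Int × Int)))
    (p : String × (Int × Int)) :
    PySem.Dict String (Int × Int) × PySem.Dict String (List (Int × Int)) :=
  match st.1.get? p.1 with
  | none => (st.1.insert p.1 p.2, st.2.insert p.1 [])
  | some (cs, ce) =>
      if p.2.1 ≤ ce + 1 then (st.1.insert p.1 (cs, max ce p.2.2), st.2)
      else (st.1.insert p.1 p.2, st.2.modify p.1 [] (· ++ [(cs, ce)]))

def merge_by_cidr_alt (rules_to_add : List (String × (Int × Int))) : List (String × (Int × Int)) :=
  let st := (PySem.List.sorted rules_to_add (fun p => p.2.1) false).foldl pvBStep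
    (PySem.Dict.empty, PySem.Dict.empty)
  -- cur[cidr] always exists for a cidr drawn from the rules; getD's default is never used
  (PySem.List.dedup (rules_to_add.map (·.1))).foldl
    (fun out c => ((st.2.getD c []).foldl (fun out r => out ++ [(c, r)]) out)
      ++ [(c, st.1.getD c (0, 0))]) []

-- ===== PRECONDITION & SPEC =====
def Spec_merge_by_cidr (rules_to_add : List (String × (Int × Int))) (out : List (String × (Int × Int))) : Prop := out = merge_by_cidr_alt rules_to_add
instance (rules_to_add : List (String × (Int × Int))) (out : List (String × (Int × Int))) : Decidable (Spec_merge_by_cidr rules_to_add out) := by unfold Spec_merge_by_cidr; infer_instance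

-- ===== CLAIM (what is proved, stated in full; the proofs are below) =====
def Claim_equal_merge_by_cidr : Prop := ∀ (rules_to_add : List (String × (Int × Int))), Dom_merge_by_cidr rules_to_add → Spec_merge_by_cidr rules_to_add (merge_by_cidr rules_to_add)

-- ===== LEMMAS AND PROOFS =====

-- a stable insertion in front of a list whose members are all strictly larger
theorem pv_insertBy_front {α : Type} (key : α → Int) (x : α) (l : List α)
    (h : ∀ z ∈ l, key x < key z) :
    PySem.List.insertBy (fun a b => decide (key a < key b)) x l = x :: l := by
  cases l with
  | nil => rfl
  | cons z t => simp [PySem.List.insertBy, h z (List.mem_cons_self)]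

theorem pv_sorted_append_singleton {α : Type} (key : α → Int) (xs : List α) (x : α) :
    PySem.List.sorted (xs ++ [x]) key false =
      PySem.List.insertBy (fun a b => decide (key a < key b)) x (PySem.List.sorted xs key false) := by
  simp [PySem.List.sorted, List.foldl_append]

theorem pv_map_insertBy {α β : Type} (f : α → β) (key : β → Int) (x : α) (acc : List α) :
    (PySem.List.insertBy (fun a b => decide (key (f a) < key (f b))) x acc).map f =
      PySem.List.insertBy (fun a b => decide (key a < key b)) (f x) (acc.map f) := by
  induction acc with
  | nil => rfl
  | cons y ys ih =>
      simp only [PySem.List.insertBy]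
      by_cases h : key (f x) < key (f y)
      · conv_rhs => rw [PySem.List.insertBy.eq_def]
        simp [h]
      · conv_rhs => rw [PySem.List.insertBy.eq_def]
        simp [h, ih]

-- mapping commutes with the stable sort when the key factors through the map
theorem pv_map_sorted {α β : Type} (f : α → β) (key : β → Int) (xs : List α) :
    (PySem.List.sorted xs (fun a => key (f a)) false).map f =
      PySem.List.sorted (xs.map f) key false := by
  induction xs using List.reverseRecOn with
  | nil => rfl
  | append_singleton xs x ih =>
      rw [pv_sorted_append_singleton, pv_map_insertBy, ih, List.map_append,
        List.map_singleton, pv_sorted_append_singleton]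

-- filtering commutes with one stable insertion into a key-sorted list
theorem pv_filter_insertBy {α : Type} (p : α → Bool) (key : α → Int) (x : α) (acc : List α)
    (h : acc.Pairwise (fun a b => key a ≤ key b)) :
    (PySem.List.insertBy (fun a b => decide (key a < key b)) x acc).filter p =
      if p x then PySem.List.insertBy (fun a b => decide (key a < key b)) x (acc.filter p)
      else acc.filter p := by
  induction acc with
  | nil => by_cases hx : p x <;> simp [PySem.List.insertBy, hx]
  | cons y ys ih =>
      have hy : ∀ z ∈ ys, key y ≤ key z := (List.pairwise_cons.mp h).1
      have hys := (List.pairwise_cons.mp h).2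
      conv_lhs => rw [PySem.List.insertBy.eq_def]
      by_cases hlt : key x < key y
      · simp only [hlt, decide_true, if_true]
        by_cases hpy : p y
        · by_cases hpx : p x <;> simp [hpy, hpx, PySem.List.insertBy, hlt]
        · by_cases hpx : p x
          · have hfront : PySem.List.insertBy (fun a b => decide (key a < key b)) x (ys.filter p)
                = x :: ys.filter p := by
              apply pv_insertBy_front
              intro z hz
              exact lt_of_lt_of_le hlt (hy z (List.mem_of_mem_filter hz))
            simp [hpy, hpx, hfront]
          · simp [hpy, hpx]
      · simp only [hlt, decide_false, Bool.false_eq_true, if_false]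
        by_cases hpy : p y
        · by_cases hpx : p x <;> simp [hpy, hpx, ih hys, PySem.List.insertBy, hlt]
        · simp [hpy, ih hys]

-- stability: filtering after the stable sort = sorting the filtered list
theorem pv_filter_sorted {α : Type} (p : α → Bool) (key : α → Int) (xs : List α) :
    (PySem.List.sorted xs key false).filter p = PySem.List.sorted (xs.filter p) key false := by
  induction xs using List.reverseRecOn with
  | nil => rfl
  | append_singleton xs x ih =>
      rw [pv_sorted_append_singleton,
        pv_filter_insertBy p key x _ (PySem.List.sorted_pairwise xs key), ih, List.filter_append]
      by_cases hpx : p x <;> simp [hpx, pv_sorted_append_singleton]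

-- the per-cidr trace of B's sweep
def pvPair (st : Option (Int × Int) × List (Int × Int)) (r : Int × Int) :
    Option (Int × Int) × List (Int × Int) :=
  match st.1 with
  | none => (some r, [])
  | some (cs, ce) =>
      if r.1 ≤ ce + 1 then (some (cs, max ce r.2), st.2) else (some r, st.2 ++ [(cs, ce)])

-- projecting B's sweep state to one cidr gives the pvPair fold over that cidr's ranges
theorem pv_proj (l : List (String × (Int × Int))) (cur : PySem.Dict String (Int × Int))
    (done : PySem.Dict String (List (Int × Int))) (c : String) :
    ((l.foldl pvBStep (cur, done)).1.get? c, (l.foldl pvBStep (cur, done)).2.getD c []) =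
      ((l.filter (fun p => p.1 == c)).map (·.2)).foldl pvPair (cur.get? c, done.getD c []) := by
  induction l generalizing cur done with
  | nil => rfl
  | cons p t ih =>
      simp only [List.foldl_cons, List.filter_cons]
      by_cases hc : p.1 = c
      · subst hc
        simp only [beq_self_eq_true, if_true, List.map_cons, List.foldl_cons]
        cases hget : cur.get? p.1 with
        | none =>
            rw [show pvBStep (cur, done) p = (cur.insert p.1 p.2, done.insert p.1 []) from by
              simp [pvBStep, hget]]
            rw [ih]
            simp [pvPair, PySem.Dict.get?_insert_self, PySem.Dict.getD_insert_self]
        | some v =>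
            obtain ⟨cs, ce⟩ := v
            by_cases hle : p.2.1 ≤ ce + 1
            · rw [show pvBStep (cur, done) p = (cur.insert p.1 (cs, max ce p.2.2), done) from by
                simp [pvBStep, hget, hle]]
              rw [ih]
              simp [pvPair, hle, PySem.Dict.get?_insert_self]
            · rw [show pvBStep (cur, done) p
                  = (cur.insert p.1 p.2, done.modify p.1 [] (· ++ [(cs, ce)])) from by
                simp [pvBStep, hget, hle]]
              rw [ih]
              simp [pvPair, hle, PySem.Dict.get?_insert_self, PySem.Dict.getD_modify_self]
      · have hbeq : (p.1 == c) = false := beq_false_of_ne hc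
        simp only [hbeq, Bool.false_eq_true, if_false]
        have hne : c ≠ p.1 := fun h => hc h.symm
        cases hget : cur.get? p.1 with
        | none =>
            rw [show pvBStep (cur, done) p = (cur.insert p.1 p.2, done.insert p.1 []) from by
              simp [pvBStep, hget]]
            rw [ih]
            rw [PySem.Dict.get?_insert_of_ne _ _ hne, PySem.Dict.getD_insert_of_ne _ _ _ hne]
        | some v =>
            obtain ⟨cs, ce⟩ := v
            by_cases hle : p.2.1 ≤ ce + 1
            · rw [show pvBStep (cur, done) p = (cur.insert p.1 (cs, max ce p.2.2), done) from by
                simp [pvBStep, hget, hle]]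
              rw [ih, PySem.Dict.get?_insert_of_ne _ _ hne]
            · rw [show pvBStep (cur, done) p
                  = (cur.insert p.1 p.2, done.modify p.1 [] (· ++ [(cs, ce)])) from by
                simp [pvBStep, hget, hle]]
              rw [ih, PySem.Dict.get?_insert_of_ne _ _ hne, PySem.Dict.getD_modify_of_ne _ _ _ hne]

-- A's merge loop over 'done ++ [x]' leaves 'done' untouched
theorem pv_aStep_append (rest : List (Int × Int)) (done : List (Int × Int)) (x : Int × Int) :
    rest.foldl pvAStep (done ++ [x]) = done ++ rest.foldl pvAStep [x] := by
  induction rest generalizing done x with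
  | nil => rfl
  | cons p t ih =>
      simp only [List.foldl_cons]
      by_cases hle : p.1 ≤ x.2 + 1
      · rw [show pvAStep (done ++ [x]) p = done ++ [(x.1, max x.2 p.2)] from by
          simp [pvAStep, hle]]
        rw [show pvAStep [x] p = [(x.1, max x.2 p.2)] from by simp [pvAStep, hle]]
        exact ih done _
      · rw [show pvAStep (done ++ [x]) p = (done ++ [x]) ++ [(p.1, p.2)] from by
          simp [pvAStep, hle]]
        rw [show pvAStep [x] p = [x] ++ [(p.1, p.2)] from by simp [pvAStep, hle]]
        rw [ih (done ++ [x]) _, ih [x] _, List.append_assoc]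

-- B's per-cidr trace equals A's merge loop
theorem pv_pair_eq_aFold (rest : List (Int × Int)) (cs ce : Int) (ds : List (Int × Int)) :
    (rest.foldl pvPair (some (cs, ce), ds)).2
      ++ [(rest.foldl pvPair (some (cs, ce), ds)).1.getD (0, 0)] =
      ds ++ rest.foldl pvAStep [(cs, ce)] := by
  induction rest generalizing cs ce ds with
  | nil => rfl
  | cons p t ih =>
      simp only [List.foldl_cons]
      by_cases hle : p.1 ≤ ce + 1
      · rw [show pvPair (some (cs, ce), ds) p = (some (cs, max ce p.2), ds) from by
          simp [pvPair, hle]]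
        rw [show pvAStep [(cs, ce)] p = [(cs, max ce p.2)] from by simp [pvAStep, hle]]
        exact ih cs _ ds
      · rw [show pvPair (some (cs, ce), ds) p = (some p, ds ++ [(cs, ce)]) from by
          simp [pvPair, hle]]
        rw [show pvAStep [(cs, ce)] p = [(cs, ce)] ++ [(p.1, p.2)] from by simp [pvAStep, hle]]
        rw [pv_aStep_append, show (p.1, p.2) = p from rfl, ih p.1 p.2 (ds ++ [(cs, ce)]),
          List.append_assoc]

theorem pv_main (rules : List (String × (Int × Int))) :
    merge_by_cidr rules = merge_by_cidr_alt rules := by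
  simp only [merge_by_cidr, merge_by_cidr_alt]
  have hnodup : (rules.foldl (fun d p => d.modify p.1 [] (· ++ [p.2]))
      (PySem.Dict.empty : PySem.Dict String (List (Int × Int)))).keys.Nodup := by
    simpa using PySem.Dict.nodup_keys_foldl_modify_key rules (fun p => p.1) []
      (fun _ p => (· ++ [p.2])) PySem.Dict.empty PySem.Dict.nodup_keys_empty
  have hkeys : (rules.foldl (fun d p => d.modify p.1 [] (· ++ [p.2]))
      (PySem.Dict.empty : PySem.Dict String (List (Int × Int)))).keys
      = PySem.List.dedup (rules.map (·.1)) := by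
    have := PySem.Dict.keys_foldl_modify_key rules (fun p => p.1) []
      (fun _ p => (· ++ [p.2])) (PySem.Dict.empty : PySem.Dict String (List (Int × Int)))
    simpa [PySem.Dict.keys_empty, PySem.Set.update, PySem.Set.ofList, PySem.List.dedup_eq_ofList]
      using this
  have hgetD : ∀ c, (rules.foldl (fun d p => d.modify p.1 [] (· ++ [p.2]))
      (PySem.Dict.empty : PySem.Dict String (List (Int × Int)))).getD c []
      = (rules.filter (fun p => p.1 == c)).map (·.2) := by
    intro c
    simpa using PySem.Dict.getD_foldl_modify_append rules
      (PySem.Dict.empty : PySem.Dict String (List (Int × Int))) c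
  rw [PySem.Dict.items_eq_map_keys _ hnodup [], hkeys, List.foldl_map]
  apply PySem.List.foldl_congr_mem
  intro out c hc
  simp only [hgetD]
  -- the per-cidr group is nonempty
  have hcm : c ∈ rules.map (·.1) := (PySem.List.mem_dedup _ c).mp hc
  obtain ⟨p, hp, hpc⟩ := List.mem_map.mp hcm
  have hgne : (rules.filter (fun p => p.1 == c)).map (·.2) ≠ [] := by
    have : p ∈ rules.filter (fun p => p.1 == c) := by
      simp [List.mem_filter, hp, hpc]
    exact List.ne_nil_of_mem (List.mem_map_of_mem this)
  -- B's sweep state projected to c, rewritten to the sorted per-cidr group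
  have hproj := pv_proj (PySem.List.sorted rules (fun p => p.2.1) false)
    PySem.Dict.empty PySem.Dict.empty c
  rw [PySem.Dict.get?_empty, PySem.Dict.getD_empty] at hproj
  rw [pv_filter_sorted (fun p => p.1 == c) (fun p => p.2.1) rules] at hproj
  rw [show ((PySem.List.sorted (rules.filter (fun p => p.1 == c)) (fun p => p.2.1) false).map
        (fun x : String × (Int × Int) => x.2))
      = PySem.List.sorted ((rules.filter (fun p => p.1 == c)).map
          (fun x : String × (Int × Int) => x.2)) (fun r : Int × Int => r.1) false from
    pv_map_sorted _ _ _] at hproj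
  -- the sorted group is nonempty
  have hsne : PySem.List.sorted ((rules.filter (fun p => p.1 == c)).map (·.2)) (fun r => r.1) false
      ≠ [] := by
    intro h
    have hperm := PySem.List.sorted_perm
      ((rules.filter (fun p => p.1 == c)).map (·.2)) (fun r => r.1) false
    rw [h] at hperm
    exact hgne hperm.symm.eq_nil
  obtain ⟨r0, rest, heq⟩ := List.exists_cons_of_ne_nil hsne
  rw [heq] at hproj
  rw [List.foldl_cons, show pvPair (none, ([] : List (Int × Int))) r0 = (some r0, []) from rfl]
    at hproj
  have hL2 := pv_pair_eq_aFold rest r0.1 r0.2 []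
  simp only [Prod.mk.eta, List.nil_append] at hL2
  have hmp : merge_port_ranges ((rules.filter (fun p => p.1 == c)).map (·.2))
      = rest.foldl pvAStep [r0] := by
    unfold merge_port_ranges
    rw [heq]
  -- assemble both contributions
  have h1 : ((PySem.List.sorted rules (fun p => p.2.1) false).foldl pvBStep
      (PySem.Dict.empty, PySem.Dict.empty)).1.getD c (0, 0)
      = (rest.foldl pvPair (some r0, [])).1.getD (0, 0) := by
    rw [PySem.Dict.getD_eq_get?_getD]
    have := congrArg Prod.fst hproj
    simp only at this
    rw [this]
  have h2 : ((PySem.List.sorted rules (fun p => p.2.1) false).foldl pvBStep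
      (PySem.Dict.empty, PySem.Dict.empty)).2.getD c []
      = (rest.foldl pvPair (some r0, [])).2 := by
    have := congrArg Prod.snd hproj
    simpa using this
  rw [h1, h2, hmp, PySem.List.foldl_append_singleton_eq_map,
    PySem.List.foldl_append_singleton_eq_map, ← hL2]
  simp [List.map_append]

-- ===== VERDICT (by name: the statement is the Claim_ definition above) =====
theorem merge_by_cidr_spec : Claim_equal_merge_by_cidr := by
  intro rules _
  exact pv_main rules
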